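-- pv_equiv track=rewrite | github.com/Essilu/music-is-digital | src/functions.py | get_notes_from_line
-- ===== SOURCE A (Python) =====
-- def get_notes_from_line(line):
--     """
--     Takes a line as a string, and gives back an array of note symbols (string, with name + figure).
--
--     We didn't just split at each spaces, because we wanted the "p" to be part of
--     the note it succeeds, to increase directly the duration of the note.
--     Hence, we split the string each time we encounter an uppercase character, preceded
--     with a lowercase character, meaning we found the beginning of a new note.
--     """
--     last_char_is_upper = True
--     raw_notes_list = []
--     current_note = ""
--
--     for char in line:
--         if not last_char_is_upper and char.isupper():
--             raw_notes_list.append(current_note)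
--             current_note = ""
--
--         current_note += char
--         last_char_is_upper = char.isupper()
--
--     raw_notes_list.append(current_note)
--     return raw_notes_list
-- ===== SOURCE B (Python) =====
-- def get_notes_from_line(line):
--     cuts = [0] + [i for i, pair in enumerate(zip(line, line[1:]), 1)
--                   if pair[1].isupper() and not pair[0].isupper()] + [len(line)]
--     return [line[a:b] for a, b in zip(cuts, cuts[1:])]
-- ===== Notes on version B (the rewrite author's own statement) =====
-- stated objective: alternative
-- what changed: A builds each note by per-character string accumulation with a flush-on-boundary flag; B first collects the cut indices (uppercase preceded by a non-uppercase) by enumerating adjacent character pairs and then produces the notes by slicing the line between consecutive cuts.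
import Mathlib
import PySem

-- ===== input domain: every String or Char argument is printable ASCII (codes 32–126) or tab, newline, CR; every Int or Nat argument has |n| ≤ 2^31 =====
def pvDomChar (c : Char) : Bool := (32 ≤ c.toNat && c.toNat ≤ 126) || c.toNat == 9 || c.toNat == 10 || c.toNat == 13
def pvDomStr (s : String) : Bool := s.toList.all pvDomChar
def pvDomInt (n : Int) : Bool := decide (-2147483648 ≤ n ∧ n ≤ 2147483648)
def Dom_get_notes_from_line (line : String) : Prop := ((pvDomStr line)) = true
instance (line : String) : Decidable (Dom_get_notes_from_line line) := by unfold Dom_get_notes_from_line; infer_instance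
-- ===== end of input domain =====

-- B replaces A's per-character accumulation loop by collecting the boundary
-- indices (uppercase after non-uppercase) in one pass and then slicing the
-- line between consecutive cut points (objective: alternative decomposition).

-- ===== PORT A =====
-- A's single loop; state = (last_char_is_upper, raw_notes_list, current_note),
-- notes kept as List Char and turned into String only at the very end.
def get_notes_from_line (line : String) : List String :=
  let fin := line.toList.foldl
    (fun (st : Bool × List (List Char) × List Char) c =>
      if !st.1 && PySem.Chars.isupper c then
        (PySem.Chars.isupper c, st.2.1 ++ [st.2.2], [c])
      else
        (PySem.Chars.isupper c, st.2.1, st.2.2 ++ [c]))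
    (true, [], [])
  (fin.2.1 ++ [fin.2.2]).map String.ofList

-- ===== PORT B =====
-- cuts = [0] + [i for i, pair in enumerate(zip(line, line[1:]), 1) if …] + [len(line)]
-- return [line[a:b] for a, b in zip(cuts, cuts[1:])]
def get_notes_from_line_alt (line : String) : List String :=
  let cs := line.toList
  let cuts : List Int :=
    [0] ++ ((PySem.List.enumerate (cs.zip (PySem.List.slice cs (some 1) none)) 1).filter
        (fun p => PySem.Chars.isupper p.2.2 && !PySem.Chars.isupper p.2.1)).map (·.1)
      ++ [(cs.length : Int)]
  (cuts.zip cuts.tail).map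
    (fun p => String.ofList (PySem.List.slice cs (some p.1) (some p.2)))

-- ===== PRECONDITION & SPEC =====
def Spec_get_notes_from_line (line : String) (out : List String) : Prop := out = get_notes_from_line_alt line
instance (line : String) (out : List String) : Decidable (Spec_get_notes_from_line line out) := by unfold Spec_get_notes_from_line; infer_instance

-- ===== CLAIM (what is proved, stated in full; the proofs are below) =====
def Claim_equal_get_notes_from_line : Prop := ∀ (line : String), Dom_get_notes_from_line line → Spec_get_notes_from_line line (get_notes_from_line line)

-- ===== LEMMAS AND PROOFS =====

-- abbreviations for the proof (char-list level)
def pvU (c : Char) : Bool := PySem.Chars.isupper c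

def pvStep (st : Bool × List (List Char) × List Char) (c : Char) :
    Bool × List (List Char) × List Char :=
  if !st.1 && pvU c then (pvU c, st.2.1 ++ [st.2.2], [c])
  else (pvU c, st.2.1, st.2.2 ++ [c])

def pvFold (cs : List Char) : Bool × List (List Char) × List Char :=
  cs.foldl pvStep (true, [], [])

def pvBnds (cs : List Char) : List Int :=
  ((PySem.List.enumerate (cs.zip cs.tail) 1).filter
      (fun p => pvU p.2.2 && !pvU p.2.1)).map (·.1)

def pvCuts (cs : List Char) : List Int := 0 :: pvBnds cs ++ [(cs.length : Int)]

def pvSlices (cs : List Char) (cuts : List Int) : List (List Char) :=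
  (cuts.zip cuts.tail).map (fun p => PySem.List.slice cs (some p.1) (some p.2))

def pvBOut (cs : List Char) : List (List Char) := pvSlices cs (pvCuts cs)

-- adjacent-pairs list of l ++ [c]
theorem pv_zip_tail_append {α : Type} (l : List α) (c : α) :
    (l ++ [c]).zip (l ++ [c]).tail
      = l.zip l.tail ++ (l.getLast?.elim [] fun b => [(b, c)]) := by
  induction l with
  | nil => simp
  | cons x xs ih =>
    cases xs with
    | nil => simp
    | cons y ys =>
      simp only [List.cons_append, List.tail_cons, List.zip_cons_cons] at *
      rw [ih]
      simp [List.getLast?_cons_cons]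

theorem pvBnds_append (cs : List Char) (c : Char) :
    pvBnds (cs ++ [c])
      = pvBnds cs ++ (cs.getLast?.elim [] fun b =>
          if pvU c && !pvU b then [(cs.length : Int)] else []) := by
  unfold pvBnds
  rw [pv_zip_tail_append]
  cases hl : cs.getLast? with
  | none =>
    have h0 : cs = [] := List.getLast?_eq_none_iff.mp hl
    subst h0
    simp [PySem.List.enumerate_nil]
  | some b =>
    have hne : cs ≠ [] := by intro h; subst h; simp at hl
    have hpos : 0 < cs.length := List.length_pos_iff.mpr hne
    have hlen : (cs.zip cs.tail).length = cs.length - 1 := by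
      rw [List.length_zip, List.length_tail]; omega
    simp only [Option.elim]
    rw [PySem.List.enumerate_append, List.filter_append, List.map_append]
    congr 1
    have hcast2 : (1 : Int) + ((cs.length - 1 : Nat) : Int) = (cs.length : Int) := by
      omega
    by_cases hc : pvU c <;> by_cases hb : pvU b <;>
      simp [PySem.List.enumerate_cons, PySem.List.enumerate_nil, List.filter,
        hc, hb, hcast2]

theorem pvBnds_mem (cs : List Char) (i : Int) (h : i ∈ pvBnds cs) :
    1 ≤ i ∧ i ≤ (cs.length : Int) - 1 := by
  unfold pvBnds at h
  rw [List.mem_map] at h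
  obtain ⟨p, hp, rfl⟩ := h
  have hp2 := List.mem_of_mem_filter hp
  rw [PySem.List.mem_enumerate_iff] at hp2
  obtain ⟨k, hk, rfl⟩ := hp2
  have hlen : (cs.zip cs.tail).length ≤ cs.length - 1 := by
    rw [List.length_zip, List.length_tail]; omega
  simp only []
  omega

theorem pv_slice_append_of_le (cs : List Char) (c : Char) (a b : Int)
    (ha : 0 ≤ a) (ha' : a ≤ (cs.length : Int)) (hb : 0 ≤ b) (hb' : b ≤ (cs.length : Int)) :
    PySem.List.slice (cs ++ [c]) (some a) (some b) = PySem.List.slice cs (some a) (some b) := by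
  rw [PySem.List.slice_toNat _ ha hb, PySem.List.slice_toNat _ ha hb]
  rw [List.drop_append_of_le_length (by omega)]
  rw [List.take_append_of_le_length (by simp [List.length_drop]; omega)]

theorem pv_slice_append_last (cs : List Char) (c : Char) (a : Int)
    (ha : 0 ≤ a) (hb : a ≤ (cs.length : Int)) :
    PySem.List.slice (cs ++ [c]) (some a) (some ((cs.length : Int) + 1))
      = PySem.List.slice cs (some a) (some (cs.length : Int)) ++ [c] := by
  rw [PySem.List.slice_toNat _ ha (by omega), PySem.List.slice_toNat _ ha (by omega)]
  rw [List.drop_append_of_le_length (by omega)]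
  rw [List.take_of_length_le (by simp [List.length_drop]; omega),
    List.take_of_length_le (by simp [List.length_drop])]

theorem pvFold_append (l : List Char) (c : Char) :
    pvFold (l ++ [c]) = pvStep (pvFold l) c := by
  unfold pvFold
  rw [List.foldl_append]
  rfl

theorem pvCuts_mem (l : List Char) (x : Int) (h : x ∈ pvCuts l) :
    0 ≤ x ∧ x ≤ (l.length : Int) := by
  unfold pvCuts at h
  rcases List.mem_cons.mp h with h | h
  · omega
  rcases List.mem_append.mp h with h | h
  · have := pvBnds_mem l x h; omega
  · simp only [List.mem_singleton] at h; omega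

theorem pvPair_mem (l : List Char) (p : Int × Int)
    (hp : p ∈ (pvCuts l).zip (pvCuts l).tail) :
    (0 ≤ p.1 ∧ p.1 ≤ (l.length : Int)) ∧ (0 ≤ p.2 ∧ p.2 ≤ (l.length : Int)) := by
  obtain ⟨h1, h2⟩ := List.of_mem_zip hp
  exact ⟨pvCuts_mem l p.1 h1, pvCuts_mem l p.2 (List.mem_of_mem_tail h2)⟩

-- the main invariant, by induction from the right
theorem pv_main (cs : List Char) :
    (pvFold cs).1 = (cs.getLast?.elim true pvU)
      ∧ pvBOut cs = (pvFold cs).2.1 ++ [(pvFold cs).2.2] := by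
  induction cs using List.reverseRecOn with
  | nil => exact ⟨rfl, by decide⟩
  | append_singleton l c ih =>
    obtain ⟨ih1, ih2⟩ := ih
    rw [pvFold_append]
    refine ⟨by unfold pvStep; split <;> simp, ?_⟩
    cases hl : l.getLast? with
    | none =>
      have h0 : l = [] := List.getLast?_eq_none_iff.mp hl
      subst h0
      show pvBOut [c] = _
      have hstep : pvStep (pvFold []) c = (pvU c, [], [c]) := rfl
      rw [hstep]
      rfl
    | some b =>
      have hne : l ≠ [] := by intro h; subst h; simp at hl
      have hpos : 0 < l.length := List.length_pos_iff.mpr hne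
      have ihl : (pvFold l).1 = pvU b := by rw [ih1, hl]; rfl
      have hlen : ((l ++ [c]).length : Int) = (l.length : Int) + 1 := by
        simp [List.length_append]
      -- bounds for all members of pvCuts l, used twice below
      have hcongr : ∀ p ∈ (pvCuts l).zip (pvCuts l).tail,
          PySem.List.slice (l ++ [c]) (some p.1) (some p.2)
            = PySem.List.slice l (some p.1) (some p.2) := by
        intro p hp
        obtain ⟨⟨h1, h2⟩, h3, h4⟩ := pvPair_mem l p hp
        exact pv_slice_append_of_le l c p.1 p.2 h1 h2 h3 h4
      by_cases hub : (pvU c && !pvU b) = true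
      · -- new boundary at index l.length: one more chunk, [c]
        have hcuts : pvCuts (l ++ [c]) = pvCuts l ++ [(l.length : Int) + 1] := by
          unfold pvCuts
          rw [pvBnds_append, hl]
          simp only [Option.elim, if_pos hub]
          simp
        have hlast : (pvCuts l).getLast? = some (l.length : Int) := by
          show ((0 :: pvBnds l) ++ [(l.length : Int)]).getLast? = _
          exact List.getLast?_concat
        unfold pvBOut pvSlices
        rw [hcuts, pv_zip_tail_append, hlast]
        simp only [Option.elim]
        rw [List.map_append, List.map_congr_left hcongr]
        have hlastslice : PySem.List.slice (l ++ [c]) (some (l.length : Int))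
            (some ((l.length : Int) + 1)) = [c] := by
          rw [PySem.List.slice_toNat _ (by omega) (by omega)]
          simp [List.drop_left']
        have hstep : pvStep (pvFold l) c
            = (pvU c, (pvFold l).2.1 ++ [(pvFold l).2.2], [c]) := by
          unfold pvStep
          rw [ihl]
          have ht : (!pvU b && pvU c) = true := by
            cases h2 : pvU c <;> cases h3 : pvU b <;> simp_all
          rw [if_pos ht]
        rw [hstep]
        simp only [hlastslice, List.map_cons, List.map_nil]
        rw [← ih2]
        rfl
      · -- no new boundary: last chunk grows by c
        have hub' : (pvU c && !pvU b) = false := by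
          cases hcb : pvU c <;> cases hbb : pvU b <;> simp_all
        have hcuts : pvCuts (l ++ [c])
            = (0 :: pvBnds l) ++ [(l.length : Int) + 1] := by
          unfold pvCuts
          rw [pvBnds_append, hl]
          simp only [Option.elim, if_neg hub]
          simp
        have hcutsl : pvCuts l = (0 :: pvBnds l) ++ [(l.length : Int)] := by
          unfold pvCuts; rfl
        rcases hq0 : (0 :: pvBnds l).getLast? with _ | a
        · simp at hq0
        have hq := hq0
        have haq : a ∈ (0 :: pvBnds l) := by
          exact List.mem_of_getLast? hq
        have hab : 0 ≤ a ∧ a ≤ (l.length : Int) := by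
          rcases List.mem_cons.mp haq with h | h
          · omega
          · have := pvBnds_mem l a h; omega
        -- decompose the old output
        have hold : pvBOut l
            = ((0 :: pvBnds l).zip (0 :: pvBnds l).tail).map
                (fun p => PySem.List.slice l (some p.1) (some p.2))
              ++ [PySem.List.slice l (some a) (some (l.length : Int))] := by
          unfold pvBOut pvSlices
          rw [hcutsl, pv_zip_tail_append, hq]
          simp only [Option.elim, List.tail_cons]
          rw [List.map_append]
          rfl
        have hsplit := ih2
        rw [hold] at hsplit
        have hinj := List.concat_inj.mp (by
          simpa [List.concat_eq_append] using hsplit)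
        -- the new output
        unfold pvBOut pvSlices
        rw [hcuts, pv_zip_tail_append, hq]
        simp only [Option.elim, List.tail_cons]
        rw [List.map_append]
        have hcongr' : ∀ p ∈ (0 :: pvBnds l).zip (pvBnds l),
            PySem.List.slice (l ++ [c]) (some p.1) (some p.2)
              = PySem.List.slice l (some p.1) (some p.2) := by
          intro p hp
          have hp' : p ∈ (pvCuts l).zip (pvCuts l).tail := by
            rw [hcutsl]
            rw [pv_zip_tail_append, hq]
            simp only [Option.elim, List.tail_cons]
            exact List.mem_append_left _ hp
          exact hcongr p hp'
        rw [List.map_congr_left hcongr']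
        have hlastslice : PySem.List.slice (l ++ [c]) (some a)
            (some ((l.length : Int) + 1))
            = PySem.List.slice l (some a) (some (l.length : Int)) ++ [c] :=
          pv_slice_append_last l c a hab.1 hab.2
        have hstep : pvStep (pvFold l) c
            = (pvU c, (pvFold l).2.1, (pvFold l).2.2 ++ [c]) := by
          unfold pvStep
          rw [ihl]
          have hf : (!pvU b && pvU c) = false := by
            cases hcb : pvU c <;> cases hbb : pvU b <;> simp_all
          simp [hf]
        rw [hstep]
        simp only [hlastslice, List.map_cons, List.map_nil]
        rw [hinj.1, hinj.2]

theorem pv_portA (line : String) :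
    get_notes_from_line line = ((pvFold line.toList).2.1 ++ [(pvFold line.toList).2.2]).map String.ofList := by
  rfl

theorem pv_portB (line : String) :
    get_notes_from_line_alt line = (pvBOut line.toList).map String.ofList := by
  simp only [get_notes_from_line_alt, pvBOut, pvCuts, pvSlices, pvBnds, pvU,
    PySem.List.slice_from_one, List.map_map, List.cons_append]
  rfl

-- ===== VERDICT (by name: the statement is the Claim_ definition above) =====
theorem get_notes_from_line_spec : Claim_equal_get_notes_from_line := by
  intro line _
  unfold Spec_get_notes_from_line
  rw [pv_portA, pv_portB, (pv_main line.toList).2]
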